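-- pv_equiv track=rewrite | github.com/josi-ai/josi-svc | scripts/generate_new_format_exports.py | format_chart_box
-- ===== SOURCE A (Python) =====
-- def format_chart_box(positions, box_number):
--     """Format a single box of the chart."""
--     planets = positions.get(box_number, [])
--     lines = [''] * 5
--
--     if planets:
--         # Distribute planets across lines
--         for i, planet in enumerate(planets):
--             line_num = min(i // 2, 4)  # Max 2 planets per line
--             if lines[line_num]:
--                 lines[line_num] += ' '
--             lines[line_num] += planet[:3]
--
--     return lines
-- ===== SOURCE B (Python) =====
-- def format_chart_box(positions, box_number):
--     """Format a single box of the chart."""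
--     planets = positions.get(box_number, [])
--     lines = [' '.join(p[:3] for p in planets[2 * j:2 * j + 2]) for j in range(4)]
--     lines.append(' '.join(p[:3] for p in planets[8:]))
--     return lines
-- ===== Notes on version B (the rewrite author's own statement) =====
-- stated objective: simpler
-- what changed: B builds each of the 5 output lines directly from a slice of the planet list (pairs planets[2j:2j+2] for lines 0-3, planets[8:] for line 4) with ' '.join, replacing A's single accumulating pass with conditional-space and list-cell bookkeeping.
-- outside the precondition, e.g. on format_chart_box({1: ['', 'Sun']}, 1): A returns ['Sun', '', '', '', ''], B returns [' Sun', '', '', '', '']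
import Mathlib
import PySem

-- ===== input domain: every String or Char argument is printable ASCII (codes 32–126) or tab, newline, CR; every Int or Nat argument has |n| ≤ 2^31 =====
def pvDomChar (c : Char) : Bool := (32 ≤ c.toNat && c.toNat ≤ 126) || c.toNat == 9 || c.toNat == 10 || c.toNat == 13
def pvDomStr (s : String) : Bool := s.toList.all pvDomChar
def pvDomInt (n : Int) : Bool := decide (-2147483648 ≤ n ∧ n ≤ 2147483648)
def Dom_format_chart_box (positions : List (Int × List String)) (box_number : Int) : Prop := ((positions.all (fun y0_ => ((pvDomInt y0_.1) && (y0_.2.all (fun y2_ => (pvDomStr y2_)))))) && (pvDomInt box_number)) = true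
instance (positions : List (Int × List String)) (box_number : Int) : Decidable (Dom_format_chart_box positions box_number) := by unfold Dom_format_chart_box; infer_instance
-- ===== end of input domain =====

-- B formats the five chart lines directly from slices of the planet list instead of A's
-- accumulating pass; simpler decomposition, return value proved equal under Pre_.

-- ===== PORT A =====
-- the body of A's 'for i, planet in enumerate(planets)' loop, as a named helper
def fcbStep (lines : List String) (ip : Int × String) : List String :=
  let line_num : Int := min (PySem.Int.floordiv ip.1 2) 4
  let lines :=
    if PySem.List.pyGetD lines line_num "" ≠ "" then
      PySem.List.pySetD lines line_num (PySem.List.pyGetD lines line_num "" ++ " ")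
    else lines
  PySem.List.pySetD lines line_num
    (PySem.List.pyGetD lines line_num "" ++ PySem.Str.slice ip.2 none (some 3))

def format_chart_box (positions : List (Int × List String)) (box_number : Int) : List String :=
  let planets := PySem.Dict.getD (PySem.Dict.mk positions) box_number []
  let lines : List String := ["", "", "", "", ""]
  if planets ≠ [] then
    (PySem.List.enumerate planets 0).foldl fcbStep lines
  else lines

-- ===== PORT B =====
def format_chart_box_alt (positions : List (Int × List String)) (box_number : Int) : List String :=
  let planets := PySem.Dict.getD (PySem.Dict.mk positions) box_number []
  ((PySem.List.pyRange 0 4 1).map (fun j =>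
      PySem.Str.join " "
        ((PySem.List.slice planets (some (2 * j)) (some (2 * j + 2))).map
          (fun p => PySem.Str.slice p none (some 3)))))
    ++ [PySem.Str.join " "
          ((PySem.List.slice planets (some 8) none).map
            (fun p => PySem.Str.slice p none (some 3)))]

-- ===== PRECONDITION & SPEC =====
-- Pre_ excludes inputs where the selected box's planet list has an empty planet name at the
-- start of a display line that holds a further planet (index 0,2,4,6,8 with a successor): there
-- A's conditional-space rule silently drops the separator (an artefact of accumulating into a
-- string), while B's join keeps it; neither value is specified for an empty planet name.
def Pre_format_chart_box (positions : List (Int × List String)) (box_number : Int) : Prop :=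
  ∀ i ∈ [0, 2, 4, 6, 8],
    i + 1 < (PySem.Dict.getD (PySem.Dict.mk positions) box_number []).length →
    (PySem.Dict.getD (PySem.Dict.mk positions) box_number []).getD i "" ≠ ""
instance (positions : List (Int × List String)) (box_number : Int) : Decidable (Pre_format_chart_box positions box_number) := by unfold Pre_format_chart_box; infer_instance
def pvWitness_format_chart_box : (List (Int × List String)) × Int :=
  ([(1, ["Sun", "Moon", "Mercury"])], 1)

def Spec_format_chart_box (positions : List (Int × List String)) (box_number : Int) (out : List String) : Prop := out = format_chart_box_alt positions box_number
instance (positions : List (Int × List String)) (box_number : Int) (out : List String) : Decidable (Spec_format_chart_box positions box_number out) := by unfold Spec_format_chart_box; infer_instance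

-- ===== CLAIM (what is proved, stated in full; the proofs are below) =====
def Claim_equal_format_chart_box : Prop := ∀ (positions : List (Int × List String)) (box_number : Int), Dom_format_chart_box positions box_number → Pre_format_chart_box positions box_number → Spec_format_chart_box positions box_number (format_chart_box positions box_number)

-- ===== LEMMAS AND PROOFS =====

-- shorthand used only by the proofs
def fcbT3 (p : String) : String := PySem.Str.slice p none (some 3)

def fcbLine (xs : List String) : String := PySem.Str.join " " (xs.map fcbT3)

def fcbSeg (l : List String) (j : Nat) : List String :=
  if j < 4 then (l.drop (2 * j)).take 2 else l.drop 8

def fcbCore (l : List String) : List String :=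
  [fcbLine (fcbSeg l 0), fcbLine (fcbSeg l 1), fcbLine (fcbSeg l 2),
   fcbLine (fcbSeg l 3), fcbLine (fcbSeg l 4)]

theorem fcbAlt_eq_core (positions : List (Int × List String)) (box_number : Int) :
    format_chart_box_alt positions box_number =
      fcbCore (PySem.Dict.getD (PySem.Dict.mk positions) box_number []) := by
  unfold format_chart_box_alt fcbCore fcbSeg fcbLine fcbT3
  set planets := PySem.Dict.getD (PySem.Dict.mk positions) box_number []
  have hr : PySem.List.pyRange 0 4 1 = [0, 1, 2, 3] := by decide
  rw [hr]
  have h02 := PySem.List.slice_toNat (xs := planets) (a := 2 * 0) (b := 2 * 0 + 2) (by norm_num) (by norm_num)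
  have h24 := PySem.List.slice_toNat (xs := planets) (a := 2 * 1) (b := 2 * 1 + 2) (by norm_num) (by norm_num)
  have h46 := PySem.List.slice_toNat (xs := planets) (a := 2 * 2) (b := 2 * 2 + 2) (by norm_num) (by norm_num)
  have h68 := PySem.List.slice_toNat (xs := planets) (a := 2 * 3) (b := 2 * 3 + 2) (by norm_num) (by norm_num)
  have h8 := PySem.List.slice_from (xs := planets) (a := 8) (by norm_num)
  simp only [List.map_cons, List.map_nil, h02, h24, h46, h68, h8]
  norm_num [show Int.toNat 2 = 2 from rfl, show Int.toNat 4 = 4 from rfl,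
    show Int.toNat 6 = 6 from rfl, show Int.toNat 8 = 8 from rfl]

theorem fcb_join_append_singleton (sep : List Char) (ys : List (List Char)) (z : List Char) :
    PySem.Chars.join sep (ys ++ [z]) =
      if ys = [] then z else PySem.Chars.join sep ys ++ sep ++ z := by
  induction ys with
  | nil => simp [PySem.Chars.join_singleton]
  | cons a ys ih =>
    cases ys with
    | nil => simp [PySem.Chars.join_cons_cons, PySem.Chars.join_singleton]
    | cons b ys' =>
      rw [show (a :: b :: ys') ++ [z] = a :: b :: (ys' ++ [z]) from rfl,
        PySem.Chars.join_cons_cons, ← List.cons_append, ih]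
      simp [PySem.Chars.join_cons_cons, List.append_assoc]

theorem fcbLine_ne (q : String) (rest : List String) (hq : q ≠ "") :
    fcbLine (q :: rest) ≠ "" := by
  intro he
  have hql : q.toList ≠ [] := by
    intro h'; exact hq (String.toList_inj.mp (by simp [h']))
  have ht : (fcbLine (q :: rest)).toList = [] := by rw [he]; rfl
  rw [fcbLine, PySem.Str.toList_join] at ht
  cases rest with
  | nil =>
    rw [List.map_cons, List.map_cons, List.map_nil, List.map_nil,
      PySem.Chars.join_singleton] at ht
    have h3 : (fcbT3 q).toList = q.toList.take 3 := by
      rw [fcbT3, PySem.Str.toList_slice]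
      simpa using PySem.List.slice_to (α := Char) q.toList (b := 3) (by norm_num)
    rw [h3] at ht
    exact hql (by simpa using List.take_eq_nil_iff.mp ht)
  | cons r rest' =>
    rw [List.map_cons, List.map_cons, List.map_cons, List.map_cons,
      PySem.Chars.join_cons_cons] at ht
    simp at ht

theorem fcbLine_drop_take_ne (l : List String) (k t : Nat) (hk : k < l.length)
    (hq : l.getD k "" ≠ "") (ht : 0 < t) : fcbLine ((l.drop k).take t) ≠ "" := by
  have hd : l.drop k ≠ [] := by rw [ne_eq, List.drop_eq_nil_iff]; omega
  obtain ⟨q, rest, hqr⟩ := List.exists_cons_of_ne_nil hd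
  have hqv : q = l.getD k "" := by
    have h0 : (l.drop k)[0]? = l[k + 0]? := List.getElem?_drop ..
    rw [hqr] at h0
    simp only [List.getElem?_cons_zero, Nat.add_zero] at h0
    simp [List.getD, ← h0]
  obtain ⟨t', rfl⟩ : ∃ t', t = t' + 1 := ⟨t - 1, by omega⟩
  rw [hqr, List.take_succ_cons]
  exact fcbLine_ne q _ (by rw [hqv]; exact hq)

theorem fcbLine_drop_ne (l : List String) (k : Nat) (hk : k < l.length)
    (hq : l.getD k "" ≠ "") : fcbLine (l.drop k) ≠ "" := by
  have h' := fcbLine_drop_take_ne l k l.length hk hq (by omega)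
  rwa [List.take_of_length_le (by rw [List.length_drop]; omega)] at h'

theorem fcbLine_append (xs : List String) (p : String) (h : xs ≠ [] → fcbLine xs ≠ "") :
    fcbLine (xs ++ [p]) =
      (if fcbLine xs ≠ "" then fcbLine xs ++ " " else fcbLine xs) ++ fcbT3 p := by
  apply String.toList_inj.mp
  rw [fcbLine, PySem.Str.toList_join, List.map_append, List.map_append, List.map_cons,
    List.map_nil, List.map_cons, List.map_nil, fcb_join_append_singleton]
  by_cases hxs : xs = []
  · subst hxs
    simp [fcbLine, show PySem.Str.join " " ([] : List String) = "" from rfl]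
  · have hmap : (xs.map fcbT3).map String.toList ≠ [] := by simp [hxs]
    rw [if_neg hmap]
    rw [if_pos (h hxs)]
    rw [String.toList_append, String.toList_append, fcbLine, PySem.Str.toList_join]

theorem fcbSeg_append (l : List String) (p : String) (j : Nat) (hj : j ≤ 4) :
    fcbSeg (l ++ [p]) j =
      if j = min (l.length / 2) 4 then fcbSeg l j ++ [p] else fcbSeg l j := by
  unfold fcbSeg
  by_cases hj4 : j < 4
  · simp only [if_pos hj4]
    by_cases hk : 2 * j ≤ l.length
    · rw [List.drop_append_of_le_length hk]
      by_cases h2 : 2 ≤ l.length - 2 * j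
      · rw [List.take_append_of_le_length (by rw [List.length_drop]; omega),
          if_neg (by omega)]
      · rw [if_pos (by omega),
          List.take_of_length_le (by rw [List.length_append, List.length_drop]; simp; omega),
          List.take_of_length_le (by rw [List.length_drop]; omega)]
    · rw [if_neg (by omega),
        List.drop_eq_nil_of_le (by rw [List.length_append]; simp; omega),
        List.drop_eq_nil_of_le (by omega)]
  · have hj4' : j = 4 := by omega
    subst hj4'
    simp only [if_neg (lt_irrefl 4)]
    by_cases h8 : 8 ≤ l.length
    · rw [List.drop_append_of_le_length h8, if_pos (by omega)]
    · rw [if_neg (by omega),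
        List.drop_eq_nil_of_le (by rw [List.length_append]; simp; omega),
        List.drop_eq_nil_of_le (by omega)]

theorem fcbCore_step (l : List String) (p : String)
    (h : ∀ j, fcbSeg l j ≠ [] → fcbLine (fcbSeg l j) ≠ "") :
    fcbCore (l ++ [p]) =
      (fcbCore l).set (min (l.length / 2) 4)
        (let cur := (fcbCore l).getD (min (l.length / 2) 4) ""
         (if cur ≠ "" then cur ++ " " else cur) ++ fcbT3 p) := by
  have e0 := fcbSeg_append l p 0 (by norm_num)
  have e1 := fcbSeg_append l p 1 (by norm_num)
  have e2 := fcbSeg_append l p 2 (by norm_num)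
  have e3 := fcbSeg_append l p 3 (by norm_num)
  have e4 := fcbSeg_append l p 4 (by norm_num)
  have hm4 : min (l.length / 2) 4 ≤ 4 := Nat.min_le_right _ _
  have h5 : min (l.length / 2) 4 = 0 ∨ min (l.length / 2) 4 = 1 ∨ min (l.length / 2) 4 = 2 ∨
      min (l.length / 2) 4 = 3 ∨ min (l.length / 2) 4 = 4 := by omega
  rcases h5 with h' | h' | h' | h' | h' <;>
    simp only [fcbCore, e0, e1, e2, e3, e4, h'] <;>
    norm_num [List.set_cons_zero, List.set_cons_succ, List.getD_cons_zero,
      List.getD_cons_succ] <;>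
    rw [fcbLine_append _ p (h _), ite_not]

theorem fcb_main (l : List String)
    (h : ∀ i ∈ [0, 2, 4, 6, 8], i + 1 < l.length → l.getD i "" ≠ "") :
    (PySem.List.enumerate l 0).foldl fcbStep ["", "", "", "", ""] = fcbCore l := by
  revert h
  induction l using List.reverseRecOn with
  | nil => intro _; rfl
  | append_singleton l p ih =>
    intro h
    have hgd : ∀ i, i < l.length → (l ++ [p]).getD i "" = l.getD i "" := by
      intro i hi
      simp [List.getD, List.getElem?_append_left hi]
    have hl : ∀ i ∈ [0, 2, 4, 6, 8], i + 1 < l.length → l.getD i "" ≠ "" := by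
      intro i hi hilen
      have h' := h i hi (by rw [List.length_append]; omega)
      rwa [hgd i (by omega)] at h'
    have hLine : ∀ j, fcbSeg l j ≠ [] → fcbLine (fcbSeg l j) ≠ "" := by
      intro j hne
      unfold fcbSeg at hne ⊢
      by_cases hj : j < 4
      · rw [if_pos hj] at hne ⊢
        have hk : 2 * j < l.length := by
          by_contra hc
          exact hne (by rw [List.drop_eq_nil_of_le (by omega)]; rfl)
        apply fcbLine_drop_take_ne l (2 * j) 2 hk _ (by omega)
        have hmem : 2 * j ∈ [0, 2, 4, 6, 8] := by interval_cases j <;> simp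
        have h' := h (2 * j) hmem (by rw [List.length_append]; simp; omega)
        rwa [hgd (2 * j) hk] at h'
      · rw [if_neg hj] at hne ⊢
        have hk : 8 < l.length := by
          by_contra hc
          exact hne (List.drop_eq_nil_of_le (by omega))
        apply fcbLine_drop_ne l 8 hk
        have h' := h 8 (by simp) (by rw [List.length_append]; simp; omega)
        rwa [hgd 8 hk] at h'
    rw [PySem.List.enumerate_append, List.foldl_append, ih hl,
      show PySem.List.enumerate [p] (0 + (l.length : Int)) = [((l.length : Int), p)] from by
        simp [PySem.List.enumerate],
      List.foldl_cons, List.foldl_nil]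
    unfold fcbStep
    have hfd : min (PySem.Int.floordiv ((l.length : Nat) : Int) 2) 4
        = ((min (l.length / 2) 4 : Nat) : Int) := by
      have h1 : PySem.Int.floordiv ((l.length : Nat) : Int) 2 = ((l.length / 2 : Nat) : Int) := by
        simp [PySem.Int.floordiv, Int.fdiv_eq_ediv]
      rw [h1, show ((4 : Int)) = ((4 : Nat) : Int) from rfl, ← Nat.cast_min]
    simp only [hfd, PySem.List.pyGetD_natCast, PySem.List.pySetD_natCast]
    rw [fcbCore_step l p hLine]
    have hm5 : min (l.length / 2) 4 < (fcbCore l).length := by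
      have : (fcbCore l).length = 5 := rfl
      omega
    by_cases hc : (fcbCore l).getD (min (l.length / 2) 4) "" = ""
    · rw [if_neg (by simpa using hc)]
      simp only [fcbT3, hc, if_neg (by simp : ¬ ("" : String) ≠ "")]
    · rw [if_pos hc]
      have hgd : ((fcbCore l).set (min (l.length / 2) 4)
          ((fcbCore l).getD (min (l.length / 2) 4) "" ++ " ")).getD (min (l.length / 2) 4) ""
          = (fcbCore l).getD (min (l.length / 2) 4) "" ++ " " := by
        simp [List.getD, hm5]
      rw [hgd, List.set_set]
      simp only [fcbT3, List.getD] at hc ⊢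
      rw [if_pos hc]

-- ===== VERDICT (by name: the statement is the Claim_ definition above) =====
theorem format_chart_box_spec : Claim_equal_format_chart_box := by
  intro positions box_number _hd hpre
  unfold Spec_format_chart_box
  rw [fcbAlt_eq_core]
  unfold format_chart_box
  set planets := PySem.Dict.getD (PySem.Dict.mk positions) box_number [] with hpl
  by_cases hne : planets = []
  · simp [hne, fcbCore, fcbSeg, fcbLine, PySem.Str.join]
  · simp only [if_pos hne]
    exact fcb_main planets hpre
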